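-- pv_equiv track=rewrite | github.com/piter239/CodinGame_solutions | codeforces/make_palindrome.py | min_swaps_to_palindrome
-- ===== SOURCE A (Python) =====
-- def min_swaps_to_palindrome(s):
--     n = len(s)
--     swaps = 0
--     s = list(s)
--     for i in range(n // 2):
--         j = n - 1 - i
--         if s[i] != s[j]:
--             k = j
--             while k > i and s[k] != s[i]:
--                 k -= 1
--             if k == i:
--                 return -1
--             while k < j:
--                 s[k], s[k + 1] = s[k + 1], s[k]
--                 swaps += 1
--                 k += 1
--     return swaps
-- ===== SOURCE B (Python) =====
-- def min_swaps_to_palindrome(s):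
--     # Shrinking-list greedy: match the first char with its last occurrence in the
--     # rest, add the distance to the far end, delete the match, drop the head.
--     t = list(s)
--     swaps = 0
--     while len(t) > 1:
--         rest = t[1:]
--         try:
--             k = len(rest) - 1 - rest[::-1].index(t[0])
--         except ValueError:
--             return -1
--         swaps += len(rest) - 1 - k
--         del rest[k]
--         t = rest
--     return swaps
-- ===== Notes on version B (the rewrite author's own statement) =====
-- stated objective: alternative
-- what changed: B replaces A's in-place two-pointer array simulation (inner downward scan for a match plus an element-by-element adjacent-swap bubbling loop) by a shrinking-list greedy: find the last occurrence of the head in the rest via reversed index, add its distance to the far end arithmetically, and delete it - no swap simulation, no index bookkeeping over the full array.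
import Mathlib
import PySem

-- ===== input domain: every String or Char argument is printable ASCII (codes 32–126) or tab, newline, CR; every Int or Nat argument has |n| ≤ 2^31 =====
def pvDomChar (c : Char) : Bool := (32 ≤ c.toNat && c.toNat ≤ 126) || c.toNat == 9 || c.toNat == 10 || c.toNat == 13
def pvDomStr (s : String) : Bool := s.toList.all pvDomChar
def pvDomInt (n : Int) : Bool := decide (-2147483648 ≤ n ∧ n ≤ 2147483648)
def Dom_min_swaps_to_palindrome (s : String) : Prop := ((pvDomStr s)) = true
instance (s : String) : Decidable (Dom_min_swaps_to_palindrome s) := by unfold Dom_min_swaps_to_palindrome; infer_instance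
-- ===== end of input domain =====

-- B is an alternative greedy over a shrinking list (reversed-index match + delete)
-- instead of A's in-place two-pointer scan-and-bubble simulation; equivalence is exact.

-- ===== PORT A =====
-- s[k], s[k+1] = s[k+1], s[k]  (both reads before both writes)
def pvSwapAdj (s : List Char) (k : Nat) : List Char :=
  (s.set k (s.getD (k+1) ' ')).set (k+1) (s.getD k ' ')

-- while k > i and s[k] != s[i]: k -= 1   (c is the unchanged value s[i])
def pvFindK (s : List Char) (i : Nat) (c : Char) (k : Nat) : Nat :=
  if h : k > i ∧ s.getD k ' ' ≠ c then pvFindK s i c (k - 1) else k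
termination_by k
decreasing_by omega

-- while k < j: swap; swaps += 1; k += 1
def pvBubble (s : List Char) (k j : Nat) (swaps : Int) : List Char × Int :=
  if h : k < j then pvBubble (pvSwapAdj s k) (k + 1) j (swaps + 1) else (s, swaps)
termination_by j - k

-- for i in range(n // 2): …  (early `return -1` kept as an early result)
def pvLoopA (s : List Char) (n : Nat) (swaps : Int) (i : Nat) : Int :=
  if h : i < n / 2 then
    let j := n - 1 - i
    if s.getD i ' ' ≠ s.getD j ' ' then
      let k := pvFindK s i (s.getD i ' ') j
      if k = i then -1
      else
        let r := pvBubble s k j swaps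
        pvLoopA r.1 n r.2 (i + 1)
    else pvLoopA s n swaps (i + 1)
  else swaps
termination_by n / 2 - i
decreasing_by all_goals omega

def min_swaps_to_palindrome (s : String) : Int :=
  pvLoopA s.toList s.toList.length 0 0

-- ===== PORT B =====
-- while len(t) > 1: rest = t[1:]; k = len(rest)-1 - rest[::-1].index(t[0]); swaps += len(rest)-1-k; del rest[k]; t = rest
def pvLoopB (t : List Char) (swaps : Int) : Int :=
  if _h : t.length > 1 then
    let rest := PySem.List.slice t (some 1) none
    match PySem.List.index? ((PySem.List.slice? rest none none (-1)).getD []) (t.getD 0 ' ') with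
    | none => -1
    | some p =>
      let k := rest.length - 1 - p
      pvLoopB (rest.eraseIdx k) (swaps + ((rest.length - 1 - k : Nat) : Int))
  else swaps
termination_by t.length
decreasing_by
  simp only [PySem.List.slice_from_one] at *
  have h1 := List.length_eraseIdx_le (l := t.tail) (i := t.tail.length - 1 - p)
  have h2 : t.tail.length = t.length - 1 := List.length_tail
  omega

def min_swaps_to_palindrome_alt (s : String) : Int :=
  pvLoopB s.toList 0

-- ===== PRECONDITION & SPEC =====
def Spec_min_swaps_to_palindrome (s : String) (out : Int) : Prop := out = min_swaps_to_palindrome_alt s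
instance (s : String) (out : Int) : Decidable (Spec_min_swaps_to_palindrome s out) := by unfold Spec_min_swaps_to_palindrome; infer_instance

-- ===== CLAIM (what is proved, stated in full; the proofs are below) =====
def Claim_equal_min_swaps_to_palindrome : Prop := ∀ (s : String), Dom_min_swaps_to_palindrome s → Spec_min_swaps_to_palindrome s (min_swaps_to_palindrome s)

-- ===== LEMMAS AND PROOFS =====


-- getD through a three-part append, at an offset inside the middle part
theorem pvGetDMid (pre t suf : List Char) (d : Nat) (h : d < t.length) :
    (pre ++ t ++ suf).getD (pre.length + d) ' ' = t.getD d ' ' := by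
  rw [List.append_assoc, List.getD_append_right _ _ _ _ (by omega)]
  rw [Nat.add_sub_cancel_left, List.getD_append _ _ _ _ h]

-- erasing the element sitting right after a prefix
theorem pvEraseIdxMid (l : List Char) (x : Char) (r : List Char) :
    (l ++ x :: r).eraseIdx l.length = l ++ r := by
  induction l with
  | nil => simp
  | cons y l ih => simp [ih]

-- the adjacent swap written by A, at the seam of a decomposition
theorem pvSwapAdjSpec (A : List Char) (x y : Char) (r : List Char) :
    pvSwapAdj (A ++ x :: y :: r) A.length = A ++ y :: x :: r := by
  unfold pvSwapAdj
  have h1 : (A ++ x :: y :: r).getD (A.length + 1) ' ' = y := by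
    rw [List.getD_append_right _ _ _ _ (by omega)]; simp
  have h0 : (A ++ x :: y :: r).getD A.length ' ' = x := by
    rw [List.getD_append_right _ _ _ _ (by omega)]; simp
  rw [h1, h0]
  have e0 : (A ++ x :: y :: r).set A.length y = A ++ y :: y :: r := by
    have := List.set_append_right (s := A) (t := x :: y :: r) A.length y (by omega)
    simpa using this
  rw [e0]
  have := List.set_append_right (s := A) (t := y :: y :: r) (A.length + 1) x (by omega)
  simpa using this

-- A's bubbling loop moves the element at the seam to the far end, counting each swap
theorem pvBubbleSpec : ∀ (mid A : List Char) (x : Char) (B : List Char) (sw : Int),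
    pvBubble (A ++ x :: (mid ++ B)) A.length (A.length + mid.length) sw
      = (A ++ mid ++ x :: B, sw + (mid.length : Int)) := by
  intro mid
  induction mid with
  | nil => intro A x B sw; rw [pvBubble]; simp
  | cons y mid ih =>
    intro A x B sw
    rw [pvBubble]
    rw [dif_pos (by simp)]
    have hsw : pvSwapAdj (A ++ x :: (y :: mid ++ B)) A.length = A ++ y :: x :: (mid ++ B) := by
      simpa using pvSwapAdjSpec A x y (mid ++ B)
    rw [hsw]
    have e1 : A ++ y :: x :: (mid ++ B) = (A ++ [y]) ++ x :: (mid ++ B) := by simp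
    have e2 : A.length + 1 = (A ++ [y]).length := by simp
    have e3 : A.length + (y :: mid).length = (A ++ [y]).length + mid.length := by simp; omega
    rw [e1, e2, e3, ih (A ++ [y]) x B (sw + 1)]
    refine Prod.ext ?_ ?_
    · simp
    · simp; ring

-- proof-only mirror of A's inner downward scan, acting on the window alone
def pvG (t : List Char) (c : Char) (d : Nat) : Nat :=
  if h : d > 0 ∧ t.getD d ' ' ≠ c then pvG t c (d - 1) else d
termination_by d
decreasing_by omega

theorem pvFindKEq : ∀ (d : Nat) (pre t suf : List Char) (c : Char), d < t.length →
    pvFindK (pre ++ t ++ suf) pre.length c (pre.length + d) = pre.length + pvG t c d := by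
  intro d
  induction d using Nat.strong_induction_on with
  | _ d ihd =>
    intro pre t suf c hd
    rw [pvFindK, pvG, pvGetDMid pre t suf d hd]
    by_cases h1 : 0 < d
    · by_cases h2 : t.getD d ' ' ≠ c
      · rw [dif_pos ⟨by omega, h2⟩, dif_pos ⟨h1, h2⟩]
        have e : pre.length + d - 1 = pre.length + (d - 1) := by omega
        rw [e, ihd (d - 1) (by omega) pre t suf c (by omega)]
      · rw [dif_neg (by tauto), dif_neg (by tauto)]
    · rw [dif_neg (by omega), dif_neg (by omega)]

theorem pvGHit (t : List Char) (c : Char) (e : Nat) (he : t.getD e ' ' = c) : pvG t c e = e := by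
  rw [pvG, dif_neg (by rw [he]; simp)]

theorem pvGDescend (t : List Char) (c : Char) (e : Nat) (he : t.getD e ' ' = c) :
    ∀ (d : Nat), e ≤ d → (∀ j, e < j → j ≤ d → t.getD j ' ' ≠ c) → pvG t c d = e := by
  intro d
  induction d using Nat.strong_induction_on with
  | _ d ihd =>
    intro hed hj
    rcases Nat.eq_or_lt_of_le hed with h | h
    · subst h; exact pvGHit t c e he
    · rw [pvG, dif_pos ⟨by omega, hj d h (le_refl d)⟩]
      exact ihd (d - 1) (by omega) (by omega) (fun j h1 h2 => hj j h1 (by omega))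

theorem pvGZero (t : List Char) (c : Char) :
    ∀ (d : Nat), (∀ j, 0 < j → j ≤ d → t.getD j ' ' ≠ c) → pvG t c d = 0 := by
  intro d
  induction d using Nat.strong_induction_on with
  | _ d ihd =>
    intro hj
    by_cases h1 : 0 < d
    · rw [pvG, dif_pos ⟨h1, hj d h1 (le_refl d)⟩]
      exact ihd (d - 1) (by omega) (fun j a1 a2 => hj j a1 (by omega))
    · have : d = 0 := by omega
      subst this
      rw [pvG, dif_neg (by omega)]

-- one unfolded step of B's loop, for a found / not-found reversed index
theorem pvLoopBNone (t : List Char) (swaps : Int) (h : 1 < t.length)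
    (hidx : PySem.List.index? ((PySem.List.slice? (PySem.List.slice t (some 1) none) none none (-1)).getD []) (t.getD 0 ' ') = none) :
    pvLoopB t swaps = -1 := by
  rw [pvLoopB, dif_pos h]
  simp only [hidx]

theorem pvLoopBSome (t : List Char) (swaps : Int) (h : 1 < t.length) (p : Nat)
    (hidx : PySem.List.index? ((PySem.List.slice? (PySem.List.slice t (some 1) none) none none (-1)).getD []) (t.getD 0 ' ') = some p) :
    pvLoopB t swaps
      = pvLoopB ((PySem.List.slice t (some 1) none).eraseIdx ((PySem.List.slice t (some 1) none).length - 1 - p))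
          (swaps + (((PySem.List.slice t (some 1) none).length - 1 - ((PySem.List.slice t (some 1) none).length - 1 - p) : Nat) : Int)) := by
  rw [pvLoopB, dif_pos h]
  simp only [hidx]

theorem pvMain : ∀ (m : Nat) (t pre suf : List Char) (swaps : Int),
    t.length = m → pre.length = suf.length →
    pvLoopA (pre ++ t ++ suf) (pre.length + t.length + suf.length) swaps pre.length
      = pvLoopB t swaps := by
  intro m
  induction m using Nat.strong_induction_on with
  | _ m IH =>
    intro t pre suf swaps ht hps
    by_cases hm : t.length ≤ 1
    · rw [pvLoopA, pvLoopB, dif_neg (by simp; omega), dif_neg (by omega)]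
    push Not at hm
    obtain ⟨a, rest, rfl⟩ : ∃ a rest, t = a :: rest := by
      cases t with
      | nil => simp at hm
      | cons a rest => exact ⟨a, rest, rfl⟩
    rcases List.eq_nil_or_concat rest with rfl | ⟨mid, b, rfl⟩
    · simp at hm
    simp only [List.concat_eq_append] at ht hm ⊢
    -- the two boundary reads of A
    have hga : (pre ++ (a :: (mid ++ [b])) ++ suf).getD pre.length ' ' = a := by
      have := pvGetDMid pre (a :: (mid ++ [b])) suf 0 (by simp)
      simpa using this
    have hjj : pre.length + (a :: (mid ++ [b])).length + suf.length - 1 - pre.length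
        = pre.length + (mid.length + 1) := by simp; omega
    have hgb : (pre ++ (a :: (mid ++ [b])) ++ suf).getD (pre.length + (mid.length + 1)) ' ' = b := by
      rw [pvGetDMid pre (a :: (mid ++ [b])) suf (mid.length + 1) (by simp)]
      rw [List.getD_cons_succ, List.getD_append_right _ _ _ _ (le_refl _)]
      simp
    rw [pvLoopA, dif_pos (by simp; omega)]
    simp only [hjj, hga, hgb]
    by_cases hab : a = b
    · -- ends already match: A skips the window, B deletes the matching last element for cost 0
      subst hab
      rw [if_neg (by simp)]
      have hidx : PySem.List.index? ((PySem.List.slice? (PySem.List.slice (a :: (mid ++ [a])) (some 1) none) none none (-1)).getD []) ((a :: (mid ++ [a])).getD 0 ' ') = some 0 := by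
        simp only [PySem.List.slice_from_one, List.tail_cons, PySem.List.slice?_none_none_neg_one,
          Option.getD_some, List.getD_cons_zero]
        rw [show (mid ++ [a]).reverse = a :: mid.reverse by simp, PySem.List.index?_cons_self]
      rw [pvLoopBSome (a :: (mid ++ [a])) swaps (by simp) 0 hidx]
      simp only [PySem.List.slice_from_one, List.tail_cons]
      rw [show (mid ++ [a]).length - 1 - 0 = mid.length by simp]
      rw [show (mid ++ [a]).eraseIdx mid.length = mid from by simpa using pvEraseIdxMid mid a []]
      rw [show ((mid ++ [a]).length - 1 - mid.length : Nat) = 0 by simp]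
      rw [show pre ++ (a :: (mid ++ [a])) ++ suf = (pre ++ [a]) ++ mid ++ (a :: suf) by simp]
      rw [show pre.length + (a :: (mid ++ [a])).length + suf.length
            = (pre ++ [a]).length + mid.length + (a :: suf).length by
          simp only [List.length_append, List.length_cons, List.length_nil]; omega]
      rw [show pre.length + 1 = (pre ++ [a]).length by simp]
      rw [IH mid.length (by simp at ht; omega) mid (pre ++ [a]) (a :: suf) swaps rfl (by simp [hps])]
      norm_num
    · -- ends differ: A scans downwards for the last match, B indexes the reversed tail
      rw [if_pos hab]
      rw [pvFindKEq (mid.length + 1) pre (a :: (mid ++ [b])) suf a (by simp)]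
      by_cases hmem : a ∈ mid
      · -- interior occurrence: both sides find the LAST occurrence of a
        have hrev : a ∈ mid.reverse := by simpa using hmem
        obtain ⟨q, hq⟩ := Option.isSome_iff_exists.mp ((PySem.List.index?_isSome_iff _ _).mpr hrev)
        obtain ⟨P, S, hPS, hPlen, hPa⟩ := (PySem.List.index?_eq_some_iff _ _ _).mp hq
        obtain ⟨u, v, hmid2, hav, hqv⟩ : ∃ u v, mid = u ++ a :: v ∧ a ∉ v ∧ q = v.length := by
          refine ⟨S.reverse, P.reverse, ?_, by simpa using hPa, by simp [← hPlen]⟩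
          have := congrArg List.reverse hPS
          simpa [List.reverse_append] using this
        subst hmid2
        have hidx : PySem.List.index? ((PySem.List.slice? (PySem.List.slice (a :: ((u ++ a :: v) ++ [b])) (some 1) none) none none (-1)).getD []) ((a :: ((u ++ a :: v) ++ [b])).getD 0 ' ') = some (v.length + 1) := by
          simp only [PySem.List.slice_from_one, List.tail_cons, PySem.List.slice?_none_none_neg_one,
            Option.getD_some, List.getD_cons_zero]
          rw [show ((u ++ a :: v) ++ [b]).reverse = b :: (v.reverse ++ a :: u.reverse) by simp]
          rw [PySem.List.index?_cons_of_ne _ (fun h => hab h.symm)]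
          rw [(PySem.List.index?_eq_some_iff _ _ v.length).mpr ⟨v.reverse, u.reverse, rfl, by simp, by simpa using hav⟩]
          rfl
        rw [pvLoopBSome (a :: ((u ++ a :: v) ++ [b])) swaps (by simp) (v.length + 1) hidx]
        simp only [PySem.List.slice_from_one, List.tail_cons]
        rw [show ((u ++ a :: v) ++ [b]).length - 1 - (v.length + 1) = u.length by
          simp only [List.length_append, List.length_cons, List.length_nil]; omega]
        rw [show (u ++ a :: v) ++ [b] = u ++ a :: (v ++ [b]) by simp]
        rw [pvEraseIdxMid u a (v ++ [b])]
        rw [show (u ++ a :: (v ++ [b])).length - 1 - u.length = v.length + 1 by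
          simp only [List.length_append, List.length_cons, List.length_nil]; omega]
        -- A: the downward scan lands on the same occurrence
        have hgv : pvG (a :: (u ++ a :: (v ++ [b]))) a ((u ++ a :: v).length + 1) = u.length + 1 := by
          apply pvGDescend
          · rw [List.getD_cons_succ, List.getD_append_right _ _ _ _ (le_refl _)]
            simp
          · simp only [List.length_append, List.length_cons, List.length_nil]; omega
          · intro j h1 h2
            rw [show j = (j - 1) + 1 by omega, List.getD_cons_succ]
            rw [List.getD_append_right _ _ _ _ (by omega)]
            rw [show j - 1 - u.length = (j - 1 - u.length - 1) + 1 by omega, List.getD_cons_succ]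
            simp only [List.length_append, List.length_cons, List.length_nil] at h2
            by_cases hlt : j - 1 - u.length - 1 < v.length
            · rw [List.getD_append _ _ _ _ hlt, List.getD_eq_getElem _ _ hlt]
              exact fun h => hav (h ▸ List.getElem_mem hlt)
            · have hEq : j - 1 - u.length - 1 = v.length := by omega
              rw [hEq, List.getD_append_right _ _ _ _ (le_refl _)]
              simp only [Nat.sub_self, List.getD_cons_zero]
              exact fun h => hab h.symm
        rw [hgv, if_neg (by omega)]
        -- A: the bubbling loop moves that occurrence to the far end
        rw [show pre ++ (a :: (u ++ a :: (v ++ [b]))) ++ suf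
              = (pre ++ a :: u) ++ a :: ((v ++ [b]) ++ suf) by simp]
        rw [show pre.length + (u.length + 1) = (pre ++ a :: u).length by
          simp only [List.length_append, List.length_cons]]
        rw [show pre.length + ((u ++ a :: v).length + 1) = (pre ++ a :: u).length + (v ++ [b]).length by
          simp only [List.length_append, List.length_cons, List.length_nil]; omega]
        rw [pvBubbleSpec (v ++ [b]) (pre ++ a :: u) a suf swaps]
        -- re-decompose for the induction hypothesis
        rw [show (pre ++ a :: u) ++ (v ++ [b]) ++ a :: suf
              = (pre ++ [a]) ++ (u ++ (v ++ [b])) ++ (a :: suf) by simp]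
        rw [show pre.length + (a :: (u ++ a :: (v ++ [b]))).length + suf.length
              = (pre ++ [a]).length + (u ++ (v ++ [b])).length + (a :: suf).length by
          simp only [List.length_append, List.length_cons, List.length_nil]; omega]
        rw [show pre.length + 1 = (pre ++ [a]).length by simp]
        rw [IH (u ++ (v ++ [b])).length (by simp only [List.length_append, List.length_cons, List.length_nil] at ht ⊢; omega)
              (u ++ (v ++ [b])) (pre ++ [a]) (a :: suf) (swaps + ((v ++ [b]).length : Int)) rfl (by simp [hps])]
        simp
      · -- no interior occurrence: both report impossibility with -1
        have hnone : PySem.List.index? mid.reverse a = none :=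
          (PySem.List.index?_eq_none_iff _ _).mpr (by simpa using hmem)
        have hidx : PySem.List.index? ((PySem.List.slice? (PySem.List.slice (a :: (mid ++ [b])) (some 1) none) none none (-1)).getD []) ((a :: (mid ++ [b])).getD 0 ' ') = none := by
          simp only [PySem.List.slice_from_one, List.tail_cons, PySem.List.slice?_none_none_neg_one,
            Option.getD_some, List.getD_cons_zero]
          rw [show (mid ++ [b]).reverse = b :: mid.reverse by simp]
          rw [PySem.List.index?_cons_of_ne _ (fun h => hab h.symm), hnone]
          rfl
        rw [pvLoopBNone (a :: (mid ++ [b])) swaps (by simp) hidx]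
        have hg0 : pvG (a :: (mid ++ [b])) a (mid.length + 1) = 0 := by
          apply pvGZero
          intro j h1 h2
          rw [show j = (j - 1) + 1 by omega, List.getD_cons_succ]
          by_cases hlt : j - 1 < mid.length
          · rw [List.getD_append _ _ _ _ hlt, List.getD_eq_getElem _ _ hlt]
            exact fun h => hmem (h ▸ List.getElem_mem hlt)
          · have hEq : j - 1 = mid.length := by omega
            rw [hEq, List.getD_append_right _ _ _ _ (le_refl _)]
            simp only [Nat.sub_self, List.getD_cons_zero]
            exact fun h => hab h.symm
        rw [hg0, if_pos (by omega)]

-- ===== VERDICT (by name: the statement is the Claim_ definition above) =====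
theorem min_swaps_to_palindrome_spec : Claim_equal_min_swaps_to_palindrome := by
  intro s _
  unfold Spec_min_swaps_to_palindrome min_swaps_to_palindrome min_swaps_to_palindrome_alt
  have := pvMain s.toList.length s.toList [] [] 0 rfl rfl
  simpa using this
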